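-- pv_equiv track=rewrite | github.com/Azhrak/stock-trends | src/explainability/model_validator.py | _categorize_features_for_strategy
-- ===== SOURCE A (Python) =====
-- from typing import Dict, List, Any, Optional
--
-- def _categorize_features_for_strategy(features: List[str]) -> Dict[str, List[str]]:
--     """Categorize features for investment strategy insights."""
--
--     categories = {
--         'momentum': [],
--         'volatility': [],
--         'volume': [],
--         'technical': [],
--         'price_levels': [],
--         'other': []
--     }
--
--     for feature in features:
--         feature_lower = feature.lower()
--
--         if any(x in feature_lower for x in ['obv', 'momentum', 'roc', 'macd']):
--             categories['momentum'].append(feature)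
--         elif any(x in feature_lower for x in ['volatility', 'atr']):
--             categories['volatility'].append(feature)
--         elif 'volume' in feature_lower:
--             categories['volume'].append(feature)
--         elif any(x in feature_lower for x in ['sma', 'ema', 'rsi', 'bb']):
--             categories['technical'].append(feature)
--         elif any(x in feature_lower for x in ['support', 'resistance', 'position', 'high', 'low']):
--             categories['price_levels'].append(feature)
--         else:
--             categories['other'].append(feature)
--
--     return categories
-- ===== SOURCE B (Python) =====
-- from typing import Dict, List
--
--
-- _RULES = [
--     ('momentum', ['obv', 'momentum', 'roc', 'macd']),
--     ('volatility', ['volatility', 'atr']),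
--     ('volume', ['volume']),
--     ('technical', ['sma', 'ema', 'rsi', 'bb']),
--     ('price_levels', ['support', 'resistance', 'position', 'high', 'low']),
--     ('other', []),
-- ]
--
--
-- def _classify(feature: str) -> str:
--     """First category whose keyword list matches the lowercased feature."""
--     feature_lower = feature.lower()
--     for name, keywords in _RULES:
--         if any(k in feature_lower for k in keywords):
--             return name
--     return 'other'
--
--
-- def _categorize_features_for_strategy(features: List[str]) -> Dict[str, List[str]]:
--     """Categorize features for investment strategy insights."""
--     return {name: [f for f in features if _classify(f) == name]
--             for name, _ in _RULES}
-- ===== Notes on version B (the rewrite author's own statement) =====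
-- stated objective: simpler
-- what changed: Replaces the six-way elif ladder appending into a mutable dict by a data-driven rules table with a first-match classifier, building each category independently as a filter of the input list (dict comprehension), instead of one pass mutating six lists.
import Mathlib
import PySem

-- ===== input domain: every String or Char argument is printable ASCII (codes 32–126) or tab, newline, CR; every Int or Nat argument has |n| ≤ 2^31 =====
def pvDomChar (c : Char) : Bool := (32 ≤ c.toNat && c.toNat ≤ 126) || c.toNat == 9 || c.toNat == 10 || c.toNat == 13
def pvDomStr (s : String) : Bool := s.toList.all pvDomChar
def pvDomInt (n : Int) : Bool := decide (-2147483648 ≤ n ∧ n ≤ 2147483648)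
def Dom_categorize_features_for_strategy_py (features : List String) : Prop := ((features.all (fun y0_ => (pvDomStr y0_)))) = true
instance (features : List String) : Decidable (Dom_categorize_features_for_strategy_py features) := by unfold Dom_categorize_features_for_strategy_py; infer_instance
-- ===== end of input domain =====

-- B replaces A's six-way elif ladder mutating a dict of lists by a rules table with a
-- first-match classifier, building each category as an independent filter (simpler, data-driven).

-- ===== PORT A =====
def categorize_features_for_strategy_py (features : List String) : List (String × List String) :=
  let categories := PySem.Dict.ofList
    [("momentum", ([] : List String)), ("volatility", []), ("volume", []),
     ("technical", []), ("price_levels", []), ("other", [])]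
  let categories := features.foldl (fun categories feature =>
    let feature_lower := PySem.Str.lower feature
    if ["obv", "momentum", "roc", "macd"].any (fun x => PySem.Str.isIn x feature_lower) then
      categories.modify "momentum" [] (· ++ [feature])
    else if ["volatility", "atr"].any (fun x => PySem.Str.isIn x feature_lower) then
      categories.modify "volatility" [] (· ++ [feature])
    else if PySem.Str.isIn "volume" feature_lower then
      categories.modify "volume" [] (· ++ [feature])
    else if ["sma", "ema", "rsi", "bb"].any (fun x => PySem.Str.isIn x feature_lower) then
      categories.modify "technical" [] (· ++ [feature])
    else if ["support", "resistance", "position", "high", "low"].any (fun x => PySem.Str.isIn x feature_lower) then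
      categories.modify "price_levels" [] (· ++ [feature])
    else
      categories.modify "other" [] (· ++ [feature])) categories
  categories.items

-- ===== PORT B =====
def pvRules : List (String × List String) :=
  [("momentum", ["obv", "momentum", "roc", "macd"]),
   ("volatility", ["volatility", "atr"]),
   ("volume", ["volume"]),
   ("technical", ["sma", "ema", "rsi", "bb"]),
   ("price_levels", ["support", "resistance", "position", "high", "low"]),
   ("other", [])]

-- the 'for name, keywords in _RULES: if any(...): return name' loop of _classify
def pvClassifyAux (feature_lower : String) : List (String × List String) → String
  | [] => "other"
  | (name, keywords) :: rest =>
      if keywords.any (fun k => PySem.Str.isIn k feature_lower) then name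
      else pvClassifyAux feature_lower rest

def pvClassify (feature : String) : String :=
  pvClassifyAux (PySem.Str.lower feature) pvRules

def categorize_features_for_strategy_py_alt (features : List String) : List (String × List String) :=
  pvRules.map (fun r => (r.1, features.filter (fun f => pvClassify f == r.1)))

-- ===== PRECONDITION & SPEC =====
def Spec_categorize_features_for_strategy_py (features : List String) (out : List (String × List String)) : Prop := out = categorize_features_for_strategy_py_alt features
instance (features : List String) (out : List (String × List String)) : Decidable (Spec_categorize_features_for_strategy_py features out) := by unfold Spec_categorize_features_for_strategy_py; infer_instance

-- ===== CLAIM (what is proved, stated in full; the proofs are below) =====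
def Claim_equal_categorize_features_for_strategy_py : Prop := ∀ (features : List String), Dom_categorize_features_for_strategy_py features → Spec_categorize_features_for_strategy_py features (categorize_features_for_strategy_py features)

-- ===== LEMMAS AND PROOFS =====

lemma pv_step (f : String) (m v vo t p o : List String) :
    (    if ["obv", "momentum", "roc", "macd"].any (fun x => PySem.Str.isIn x (PySem.Str.lower f)) then
      (PySem.Dict.mk [("momentum", m), ("volatility", v), ("volume", vo), ("technical", t), ("price_levels", p), ("other", o)]).modify "momentum" [] (· ++ [f])
    else if ["volatility", "atr"].any (fun x => PySem.Str.isIn x (PySem.Str.lower f)) then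
      (PySem.Dict.mk [("momentum", m), ("volatility", v), ("volume", vo), ("technical", t), ("price_levels", p), ("other", o)]).modify "volatility" [] (· ++ [f])
    else if PySem.Str.isIn "volume" (PySem.Str.lower f) then
      (PySem.Dict.mk [("momentum", m), ("volatility", v), ("volume", vo), ("technical", t), ("price_levels", p), ("other", o)]).modify "volume" [] (· ++ [f])
    else if ["sma", "ema", "rsi", "bb"].any (fun x => PySem.Str.isIn x (PySem.Str.lower f)) then
      (PySem.Dict.mk [("momentum", m), ("volatility", v), ("volume", vo), ("technical", t), ("price_levels", p), ("other", o)]).modify "technical" [] (· ++ [f])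
    else if ["support", "resistance", "position", "high", "low"].any (fun x => PySem.Str.isIn x (PySem.Str.lower f)) then
      (PySem.Dict.mk [("momentum", m), ("volatility", v), ("volume", vo), ("technical", t), ("price_levels", p), ("other", o)]).modify "price_levels" [] (· ++ [f])
    else
      (PySem.Dict.mk [("momentum", m), ("volatility", v), ("volume", vo), ("technical", t), ("price_levels", p), ("other", o)]).modify "other" [] (· ++ [f]))
    = PySem.Dict.mk
      [("momentum", if pvClassify f == "momentum" then m ++ [f] else m),
       ("volatility", if pvClassify f == "volatility" then v ++ [f] else v),
       ("volume", if pvClassify f == "volume" then vo ++ [f] else vo),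
       ("technical", if pvClassify f == "technical" then t ++ [f] else t),
       ("price_levels", if pvClassify f == "price_levels" then p ++ [f] else p),
       ("other", if pvClassify f == "other" then o ++ [f] else o)] := by
  simp only [List.any_cons, List.any_nil, Bool.or_false]
  by_cases h1 : ((PySem.Str.isIn "obv" (PySem.Str.lower f) || (PySem.Str.isIn "momentum" (PySem.Str.lower f) || (PySem.Str.isIn "roc" (PySem.Str.lower f) || PySem.Str.isIn "macd" (PySem.Str.lower f)))) = true)
  · have hc : pvClassify f = "momentum" := by
      simp only [pvClassify, pvRules, pvClassifyAux, List.any_cons, List.any_nil, Bool.or_false]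
      rw [if_pos h1]
    rw [if_pos h1]
    simp [hc, PySem.Dict.modify, PySem.Dict.insert, PySem.Dict.getD, PySem.Dict.get?]
  · rw [if_neg h1]
    by_cases h2 : ((PySem.Str.isIn "volatility" (PySem.Str.lower f) || PySem.Str.isIn "atr" (PySem.Str.lower f)) = true)
    · have hc : pvClassify f = "volatility" := by
        simp only [pvClassify, pvRules, pvClassifyAux, List.any_cons, List.any_nil, Bool.or_false]
        rw [if_neg h1, if_pos h2]
      rw [if_pos h2]
      simp [hc, PySem.Dict.modify, PySem.Dict.insert, PySem.Dict.getD, PySem.Dict.get?]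
    · rw [if_neg h2]
      by_cases h3 : (PySem.Str.isIn "volume" (PySem.Str.lower f) = true)
      · have hc : pvClassify f = "volume" := by
          simp only [pvClassify, pvRules, pvClassifyAux, List.any_cons, List.any_nil, Bool.or_false]
          rw [if_neg h1, if_neg h2, if_pos h3]
        rw [if_pos h3]
        simp [hc, PySem.Dict.modify, PySem.Dict.insert, PySem.Dict.getD, PySem.Dict.get?]
      · rw [if_neg h3]
        by_cases h4 : ((PySem.Str.isIn "sma" (PySem.Str.lower f) || (PySem.Str.isIn "ema" (PySem.Str.lower f) || (PySem.Str.isIn "rsi" (PySem.Str.lower f) || PySem.Str.isIn "bb" (PySem.Str.lower f)))) = true)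
        · have hc : pvClassify f = "technical" := by
            simp only [pvClassify, pvRules, pvClassifyAux, List.any_cons, List.any_nil, Bool.or_false]
            rw [if_neg h1, if_neg h2, if_neg h3, if_pos h4]
          rw [if_pos h4]
          simp [hc, PySem.Dict.modify, PySem.Dict.insert, PySem.Dict.getD, PySem.Dict.get?]
        · rw [if_neg h4]
          by_cases h5 : ((PySem.Str.isIn "support" (PySem.Str.lower f) || (PySem.Str.isIn "resistance" (PySem.Str.lower f) || (PySem.Str.isIn "position" (PySem.Str.lower f) || (PySem.Str.isIn "high" (PySem.Str.lower f) || PySem.Str.isIn "low" (PySem.Str.lower f))))) = true)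
          · have hc : pvClassify f = "price_levels" := by
              simp only [pvClassify, pvRules, pvClassifyAux, List.any_cons, List.any_nil, Bool.or_false]
              rw [if_neg h1, if_neg h2, if_neg h3, if_neg h4, if_pos h5]
            rw [if_pos h5]
            simp [hc, PySem.Dict.modify, PySem.Dict.insert, PySem.Dict.getD, PySem.Dict.get?]
          · have hc : pvClassify f = "other" := by
              simp only [pvClassify, pvRules, pvClassifyAux, List.any_cons, List.any_nil, Bool.or_false]
              rw [if_neg h1, if_neg h2, if_neg h3, if_neg h4, if_neg h5]
              simp
            rw [if_neg h5]
            simp [hc, PySem.Dict.modify, PySem.Dict.insert, PySem.Dict.getD, PySem.Dict.get?]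



lemma pv_slot (c : Bool) (a l : List String) (f : String) :
    (if c then a ++ [f] else a) ++ l = a ++ (if c then f :: l else l) := by
  cases c <;> simp

lemma pv_fold_inv (features : List String) (m v vo t p o : List String) :
    (features.foldl     (fun categories feature =>
      if ["obv", "momentum", "roc", "macd"].any (fun x => PySem.Str.isIn x (PySem.Str.lower feature)) then
        categories.modify "momentum" [] (· ++ [feature])
      else if ["volatility", "atr"].any (fun x => PySem.Str.isIn x (PySem.Str.lower feature)) then
        categories.modify "volatility" [] (· ++ [feature])
      else if PySem.Str.isIn "volume" (PySem.Str.lower feature) then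
        categories.modify "volume" [] (· ++ [feature])
      else if ["sma", "ema", "rsi", "bb"].any (fun x => PySem.Str.isIn x (PySem.Str.lower feature)) then
        categories.modify "technical" [] (· ++ [feature])
      else if ["support", "resistance", "position", "high", "low"].any (fun x => PySem.Str.isIn x (PySem.Str.lower feature)) then
        categories.modify "price_levels" [] (· ++ [feature])
      else
        categories.modify "other" [] (· ++ [feature]))
      (PySem.Dict.mk [("momentum", m), ("volatility", v), ("volume", vo), ("technical", t), ("price_levels", p), ("other", o)])).items
    = [("momentum", m ++ features.filter (fun f => pvClassify f == "momentum")),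
       ("volatility", v ++ features.filter (fun f => pvClassify f == "volatility")),
       ("volume", vo ++ features.filter (fun f => pvClassify f == "volume")),
       ("technical", t ++ features.filter (fun f => pvClassify f == "technical")),
       ("price_levels", p ++ features.filter (fun f => pvClassify f == "price_levels")),
       ("other", o ++ features.filter (fun f => pvClassify f == "other"))] := by
  induction features generalizing m v vo t p o with
  | nil => simp
  | cons f rest ih =>
    rw [List.foldl_cons, pv_step, ih]
    simp only [List.filter_cons, pv_slot]


-- ===== VERDICT (by name: the statement is the Claim_ definition above) =====
theorem categorize_features_for_strategy_py_spec : Claim_equal_categorize_features_for_strategy_py := by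
  intro features _
  show (List.foldl     (fun categories feature =>
      if ["obv", "momentum", "roc", "macd"].any (fun x => PySem.Str.isIn x (PySem.Str.lower feature)) then
        categories.modify "momentum" [] (· ++ [feature])
      else if ["volatility", "atr"].any (fun x => PySem.Str.isIn x (PySem.Str.lower feature)) then
        categories.modify "volatility" [] (· ++ [feature])
      else if PySem.Str.isIn "volume" (PySem.Str.lower feature) then
        categories.modify "volume" [] (· ++ [feature])
      else if ["sma", "ema", "rsi", "bb"].any (fun x => PySem.Str.isIn x (PySem.Str.lower feature)) then
        categories.modify "technical" [] (· ++ [feature])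
      else if ["support", "resistance", "position", "high", "low"].any (fun x => PySem.Str.isIn x (PySem.Str.lower feature)) then
        categories.modify "price_levels" [] (· ++ [feature])
      else
        categories.modify "other" [] (· ++ [feature]))
      (PySem.Dict.mk [("momentum", []), ("volatility", []), ("volume", []),
                      ("technical", []), ("price_levels", []), ("other", [])]) features).items
    = categorize_features_for_strategy_py_alt features
  rw [pv_fold_inv]
  simp [categorize_features_for_strategy_py_alt, pvRules]
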